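-- pv_equiv track=rewrite | github.com/Apollinaria-bot/kostrub-polina | программирование/задание10/z.py | find_min_max_sum_rows
-- ===== SOURCE A (Python) =====
-- def find_min_max_sum_rows(matrix):
--     min_row_index = 0
--     max_row_index = 0
--
--     min_sum = sum(matrix[min_row_index])
--     max_sum = min_sum
--
--     for i in range(1, len(matrix)):
--         current_sum = sum(matrix[i])
--         if current_sum < min_sum:
--             min_sum = current_sum
--             min_row_index = i
--         if current_sum > max_sum:
--             max_sum = current_sum
--             max_row_index = i
--
--     return matrix[min_row_index], min_sum, matrix[max_row_index], max_sum
-- ===== SOURCE B (Python) =====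
-- def find_min_max_sum_rows(matrix):
--     sums = [sum(row) for row in matrix]
--     min_i = min(range(len(matrix)), key=lambda i: sums[i])
--     max_i = max(range(len(matrix)), key=lambda i: sums[i])
--     return matrix[min_i], sums[min_i], matrix[max_i], sums[max_i]
-- ===== Notes on version B (the rewrite author's own statement) =====
-- stated objective: simpler
-- what changed: Replaced A's single combined tracking loop (running min-sum/max-sum with index bookkeeping) by a precomputed row-sum table plus two separate first-occurrence argmin/argmax reductions via min/max with a key.
import Mathlib
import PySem

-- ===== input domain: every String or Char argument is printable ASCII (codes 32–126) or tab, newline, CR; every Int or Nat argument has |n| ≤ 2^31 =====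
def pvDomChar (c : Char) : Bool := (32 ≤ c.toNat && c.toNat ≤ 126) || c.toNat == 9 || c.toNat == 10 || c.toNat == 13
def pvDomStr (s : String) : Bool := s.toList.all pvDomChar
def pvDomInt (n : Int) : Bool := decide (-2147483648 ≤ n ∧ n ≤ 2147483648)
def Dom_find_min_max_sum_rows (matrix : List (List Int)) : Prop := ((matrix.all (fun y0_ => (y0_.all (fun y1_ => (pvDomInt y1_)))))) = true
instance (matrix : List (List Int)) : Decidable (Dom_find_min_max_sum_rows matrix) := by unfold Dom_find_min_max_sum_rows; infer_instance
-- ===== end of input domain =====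

-- B replaces A's combined tracking loop by a row-sum table plus two separate first-occurrence
-- argmin/argmax reductions (min/max with key); same cost, simpler decomposition.


-- ===== PORT A =====
-- sum(row): Python's built-in sum, start 0
def pySumInt (l : List Int) : Int := l.foldl (· + ·) 0

-- literal port of A: one loop over range(1, len(matrix)) carrying the state
-- (min_row_index, max_row_index, min_sum, max_sum); matrix[i] is in range wherever
-- Python evaluates it, ported as pyGetD with default [].
def find_min_max_sum_rows (matrix : List (List Int)) : List Int × Int × List Int × Int :=
  let s0 := pySumInt (PySem.List.pyGetD matrix 0 [])
  let st := (PySem.List.pyRange 1 matrix.length 1).foldl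
    (fun (st : Int × Int × Int × Int) i =>
      let cur := pySumInt (PySem.List.pyGetD matrix i [])
      let p := if cur < st.2.2.1 then (cur, i) else (st.2.2.1, st.1)
      let q := if cur > st.2.2.2 then (cur, i) else (st.2.2.2, st.2.1)
      (p.2, q.2, p.1, q.1))
    (0, 0, s0, s0)
  (PySem.List.pyGetD matrix st.1 [], st.2.2.1,
   PySem.List.pyGetD matrix st.2.1 [], st.2.2.2)

-- ===== PORT B =====
-- literal port of Source B: row-sum table, then min/max over range(len(matrix)) with key i ↦ sums[i];
-- Python's min/max raise on an empty range (excluded by Pre_), ported as .getD 0.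
def find_min_max_sum_rows_alt (matrix : List (List Int)) : List Int × Int × List Int × Int :=
  let sums := matrix.map pySumInt
  let key := fun (i : Int) => PySem.List.pyGetD sums i 0
  let min_i := (PySem.List.min? (PySem.List.pyRange 0 matrix.length 1) key).getD 0
  let max_i := (PySem.List.max? (PySem.List.pyRange 0 matrix.length 1) key).getD 0
  (PySem.List.pyGetD matrix min_i [], PySem.List.pyGetD sums min_i 0,
   PySem.List.pyGetD matrix max_i [], PySem.List.pyGetD sums max_i 0)

-- ===== PRECONDITION & SPEC =====
-- A raises IndexError on the empty matrix (matrix[0]); excluded.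
def Pre_find_min_max_sum_rows (matrix : List (List Int)) : Prop := matrix ≠ []
instance (matrix : List (List Int)) : Decidable (Pre_find_min_max_sum_rows matrix) := by unfold Pre_find_min_max_sum_rows; infer_instance
def pvWitness_find_min_max_sum_rows : List (List Int) := [[1, 2], [3]]

def Spec_find_min_max_sum_rows (matrix : List (List Int)) (out : List Int × Int × List Int × Int) : Prop := out = find_min_max_sum_rows_alt matrix
instance (matrix : List (List Int)) (out : List Int × Int × List Int × Int) : Decidable (Spec_find_min_max_sum_rows matrix out) := by unfold Spec_find_min_max_sum_rows; infer_instance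

-- ===== CLAIM (what is proved, stated in full; the proofs are below) =====
def Claim_equal_find_min_max_sum_rows : Prop := ∀ (matrix : List (List Int)), Dom_find_min_max_sum_rows matrix → Pre_find_min_max_sum_rows matrix → Spec_find_min_max_sum_rows matrix (find_min_max_sum_rows matrix)

-- ===== LEMMAS AND PROOFS =====

-- running argmin/argmax with a seed (first-occurrence tie-breaking)
def selMin (k : Int → Int) (a : Int) (L : List Int) : Int :=
  L.foldl (fun m x => if k x < k m then x else m) a
def selMax (k : Int → Int) (b : Int) (L : List Int) : Int :=
  L.foldl (fun m x => if k m < k x then x else m) b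

theorem min?_cons (k : Int → Int) (L : List Int) : ∀ a : Int,
    PySem.List.min? (a :: L) k = some (selMin k a L) := by
  induction L with
  | nil => intro a; rfl
  | cons i L ih =>
    intro a
    have h1 : PySem.List.min? (a :: i :: L) k
        = PySem.List.min? ((if k i < k a then i else a) :: L) k := by
      simp only [PySem.List.min?, List.foldl_cons]
      by_cases h : k i < k a <;> simp [h]
    rw [h1]
    by_cases h : k i < k a <;> simp [h, ih, selMin]

theorem max?_cons (k : Int → Int) (L : List Int) : ∀ b : Int,
    PySem.List.max? (b :: L) k = some (selMax k b L) := by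
  induction L with
  | nil => intro b; rfl
  | cons i L ih =>
    intro b
    have h1 : PySem.List.max? (b :: i :: L) k
        = PySem.List.max? ((if k b < k i then i else b) :: L) k := by
      simp only [PySem.List.max?, List.foldl_cons]
      by_cases h : k b < k i <;> simp [h]
    rw [h1]
    by_cases h : k b < k i <;> simp [h, ih, selMax]

-- A's combined loop computes exactly (argmin, argmax, key argmin, key argmax)
theorem core (k : Int → Int) (L : List Int) : ∀ a b : Int,
    L.foldl
      (fun (st : Int × Int × Int × Int) i =>
        let cur := k i
        let p := if cur < st.2.2.1 then (cur, i) else (st.2.2.1, st.1)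
        let q := if cur > st.2.2.2 then (cur, i) else (st.2.2.2, st.2.1)
        (p.2, q.2, p.1, q.1))
      (a, b, k a, k b)
    = (selMin k a L, selMax k b L, k (selMin k a L), k (selMax k b L)) := by
  induction L with
  | nil => intro a b; rfl
  | cons i L ih =>
    intro a b
    simp only [List.foldl_cons]
    by_cases h1 : k i < k a <;> by_cases h2 : k i > k b <;>
      simpa [h1, h2, selMin, selMax] using ih _ _

-- B's key equals A's per-index row sum at every integer index (out-of-range default and
-- negative wraparound behave identically on sums and on matrix)
theorem key_eq (matrix : List (List Int)) (i : Int) :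
    PySem.List.pyGetD (matrix.map pySumInt) i 0 = pySumInt (PySem.List.pyGetD matrix i []) := by
  simpa [pySumInt] using PySem.List.pyGetD_map pySumInt matrix i []

-- ===== VERDICT (by name: the statement is the Claim_ definition above) =====
theorem find_min_max_sum_rows_spec : Claim_equal_find_min_max_sum_rows := by
  intro matrix _ hpre
  unfold Spec_find_min_max_sum_rows find_min_max_sum_rows find_min_max_sum_rows_alt
  set k : Int → Int := fun i => pySumInt (PySem.List.pyGetD matrix i []) with hk
  have hkey : (fun (i : Int) => PySem.List.pyGetD (matrix.map pySumInt) i 0) = k := by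
    funext i; exact key_eq matrix i
  have hn : (0 : Int) < matrix.length := by
    have : matrix.length ≠ 0 := by simpa using List.length_eq_zero_iff.not.mpr hpre
    omega
  have hrange : PySem.List.pyRange 0 (matrix.length : Int) 1
      = 0 :: PySem.List.pyRange 1 (matrix.length : Int) 1 := by
    simpa using PySem.List.pyRange_one_cons hn
  simp only [hkey, hrange, min?_cons, max?_cons, Option.getD_some]
  rw [core k (PySem.List.pyRange 1 (matrix.length : Int) 1) 0 0]
  simp [key_eq, hk]
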